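-- pv_equiv track=rewrite | github.com/takutosquare00-max/jlpt-kakunin-test | Minnanonihongo/shared/fukushu_lead_unit31.py | iter_fukushu_segments
-- ===== SOURCE A (Python) =====
-- def fukushu_segment_key(q: int) -> str:
--     """パート結合時に復習ブロックを分割するための連続キー（表・読解・文・意向・会話）。"""
--     if 33 <= q <= 36:
--         return "hyou"
--     if 37 <= q <= 40:
--         return "dokkai"
--     k = _fukushu_q_kind(q)
--     if k in ("bun_omo", "bun_tsumori"):
--         return "bun"
--     return k
--
-- def iter_fukushu_segments(f_lo: int, f_hi: int) -> list[tuple[str, list[int]]]: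
--     """[ (セグメントキー, [通し番号…]), … ] 連続する同一キーをまとめる。"""
--     qs = list(range(f_lo, f_hi + 1))
--     if not qs:
--         return []
--     out: list[tuple[str, list[int]]] = []
--     cur_k = fukushu_segment_key(qs[0])
--     buf = [qs[0]]
--     for q in qs[1:]:
--         k = fukushu_segment_key(q)
--         if k == cur_k:
--             buf.append(q)
--         else:
--             out.append((cur_k, buf))
--             cur_k, buf = k, [q]
--     out.append((cur_k, buf))
--     return out
--
-- def _fukushu_q_kind(q: int) -> str:
--     """復習通し番号（1…40）に対応する設問タイプ（リード文切り替え用）。"""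
--     if 1 <= q <= 14 or 20 <= q <= 24:
--         return "ikou"
--     if 15 <= q <= 19:
--         return "kaiwa"
--     if 25 <= q <= 28:
--         return "bun_omo"
--     if 29 <= q <= 32:
--         return "bun_tsumori"
--     if 33 <= q <= 36:
--         return "hyou"
--     if 37 <= q <= 40:
--         return "dokkai"
--     return "ikou"
-- ===== SOURCE B (Python) =====
-- def _seg_end(q):
--     # upper end of the maximal constant-key run containing q (None = unbounded above)
--     if q <= 14:
--         return 14
--     if q <= 19:
--         return 19
--     if q <= 24:
--         return 24
--     if q <= 32:
--         return 32
--     if q <= 36: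
--         return 36
--     if q <= 40:
--         return 40
--     return None
--
--
-- def _seg_key(q):
--     if 15 <= q <= 19:
--         return "kaiwa"
--     if 25 <= q <= 32:
--         return "bun"
--     if 33 <= q <= 36:
--         return "hyou"
--     if 37 <= q <= 40:
--         return "dokkai"
--     return "ikou"
--
--
-- def iter_fukushu_segments(f_lo, f_hi):
--     out = []
--     start = f_lo
--     while start <= f_hi:
--         e = _seg_end(start)
--         end = f_hi if e is None else min(e, f_hi)
--         out.append((_seg_key(start), list(range(start, end + 1))))
--         start = end + 1
--     return out
-- ===== Notes on version B (the rewrite author's own statement) =====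
-- stated objective: alternative
-- what changed: Instead of walking every integer in [f_lo, f_hi] and run-length grouping keys one element at a time, B jumps directly from one segment boundary to the next (at most 7 boundaries), emitting each segment's key and its whole range in one step.
import Mathlib
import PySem

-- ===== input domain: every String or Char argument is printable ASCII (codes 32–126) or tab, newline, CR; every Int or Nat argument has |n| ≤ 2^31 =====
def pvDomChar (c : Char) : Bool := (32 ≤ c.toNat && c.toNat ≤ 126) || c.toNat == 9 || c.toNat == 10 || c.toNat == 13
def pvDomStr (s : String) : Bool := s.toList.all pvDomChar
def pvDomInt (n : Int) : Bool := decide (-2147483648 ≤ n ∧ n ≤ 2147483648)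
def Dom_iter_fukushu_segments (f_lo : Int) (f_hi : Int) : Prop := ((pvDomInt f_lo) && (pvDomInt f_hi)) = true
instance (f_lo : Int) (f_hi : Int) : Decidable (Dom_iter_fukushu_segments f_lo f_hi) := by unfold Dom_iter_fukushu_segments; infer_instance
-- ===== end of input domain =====

-- B replaces A's element-by-element run-length grouping by a jump from one
-- segment boundary to the next (at most 7 key computations); return values equal.

-- ===== PORT A =====

def fukushu_q_kind (q : Int) : String :=
  if (1 ≤ q ∧ q ≤ 14) ∨ (20 ≤ q ∧ q ≤ 24) then "ikou"
  else if 15 ≤ q ∧ q ≤ 19 then "kaiwa"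
  else if 25 ≤ q ∧ q ≤ 28 then "bun_omo"
  else if 29 ≤ q ∧ q ≤ 32 then "bun_tsumori"
  else if 33 ≤ q ∧ q ≤ 36 then "hyou"
  else if 37 ≤ q ∧ q ≤ 40 then "dokkai"
  else "ikou"

def fukushu_segment_key (q : Int) : String :=
  if 33 ≤ q ∧ q ≤ 36 then "hyou"
  else if 37 ≤ q ∧ q ≤ 40 then "dokkai"
  else
    let k := fukushu_q_kind q
    if k = "bun_omo" ∨ k = "bun_tsumori" then "bun" else k

-- finalize A's loop state: out.append((cur_k, buf)); return out
def finA (s : List (String × List Int) × String × List Int) : List (String × List Int) :=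
  s.1 ++ [(s.2.1, s.2.2)]

-- the for-loop of A, carrying (out, cur_k, buf)
def iterA_loop : (List (String × List Int) × String × List Int) → List Int →
    List (String × List Int) × String × List Int
  | s, [] => s
  | (out, cur_k, buf), q :: rest =>
    let k := fukushu_segment_key q
    if k = cur_k then iterA_loop (out, cur_k, buf ++ [q]) rest
    else iterA_loop (out ++ [(cur_k, buf)], k, [q]) rest

def iter_fukushu_segments (f_lo : Int) (f_hi : Int) : List (String × List Int) :=
  match PySem.List.pyRange f_lo (f_hi + 1) 1 with
  | [] => []
  | q0 :: rest => finA (iterA_loop ([], fukushu_segment_key q0, [q0]) rest)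

-- ===== PORT B =====

def segEnd (q : Int) : Option Int :=
  if q ≤ 14 then some 14
  else if q ≤ 19 then some 19
  else if q ≤ 24 then some 24
  else if q ≤ 32 then some 32
  else if q ≤ 36 then some 36
  else if q ≤ 40 then some 40
  else none

def segKey (q : Int) : String :=
  if 15 ≤ q ∧ q ≤ 19 then "kaiwa"
  else if 25 ≤ q ∧ q ≤ 32 then "bun"
  else if 33 ≤ q ∧ q ≤ 36 then "hyou"
  else if 37 ≤ q ∧ q ≤ 40 then "dokkai"
  else "ikou"

theorem segEnd_some_ge {q e : Int} (h : segEnd q = some e) : q ≤ e := by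
  unfold segEnd at h; split_ifs at h <;> simp_all <;> omega

-- the while-loop of B
def iterB_loop (f_hi : Int) (start : Int) : List (String × List Int) :=
  if h : start ≤ f_hi then
    let e := match segEnd start with
      | none => f_hi
      | some e => min e f_hi
    (segKey start, PySem.List.pyRange start (e + 1) 1) :: iterB_loop f_hi (e + 1)
  else []
termination_by (f_hi + 1 - start).toNat
decreasing_by
  cases he : segEnd start with
  | none => simp only [he] at *; omega
  | some e =>
    have h1 := segEnd_some_ge he
    simp only [he, min_def] at *
    split_ifs at * <;> omega

def iter_fukushu_segments_alt (f_lo : Int) (f_hi : Int) : List (String × List Int) :=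
  iterB_loop f_hi f_lo

-- ===== PRECONDITION & SPEC =====
def Spec_iter_fukushu_segments (f_lo : Int) (f_hi : Int) (out : List (String × List Int)) : Prop := out = iter_fukushu_segments_alt f_lo f_hi
instance (f_lo : Int) (f_hi : Int) (out : List (String × List Int)) : Decidable (Spec_iter_fukushu_segments f_lo f_hi out) := by unfold Spec_iter_fukushu_segments; infer_instance

-- ===== CLAIM (what is proved, stated in full; the proofs are below) =====
def Claim_equal_iter_fukushu_segments : Prop := ∀ (f_lo : Int) (f_hi : Int), Dom_iter_fukushu_segments f_lo f_hi → Spec_iter_fukushu_segments f_lo f_hi (iter_fukushu_segments f_lo f_hi)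

-- ===== LEMMAS AND PROOFS =====

-- the end of the run, clipped to f_hi
def segEndV (f_hi : Int) (q : Int) : Int :=
  match segEnd q with
  | none => f_hi
  | some e => min e f_hi

-- A's key agrees with B's key everywhere
set_option maxHeartbeats 4000000 in
theorem key_eq (q : Int) : fukushu_segment_key q = segKey q := by
  unfold fukushu_segment_key fukushu_q_kind segKey
  split_ifs <;> first | rfl | omega | simp_all

set_option maxHeartbeats 4000000 in
theorem segKey_const {q r : Int} (h1 : q ≤ r)
    (h2 : segEnd q = none ∨ ∃ e, segEnd q = some e ∧ r ≤ e) :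
    segKey r = segKey q := by
  unfold segEnd at h2
  unfold segKey
  rcases h2 with h | ⟨e, he, hre⟩ <;>
    split_ifs at * <;> first | rfl | omega | simp_all <;> omega

theorem segKey_const' {f_hi q r : Int} (hq : q ≤ f_hi) (h1 : q ≤ r) (h2 : r ≤ segEndV f_hi q) :
    segKey r = segKey q := by
  unfold segEndV at h2
  cases he : segEnd q with
  | none => exact segKey_const h1 (Or.inl he)
  | some e =>
    rw [he] at h2
    have h2' : r ≤ min e f_hi := h2
    exact segKey_const h1 (Or.inr ⟨e, he, le_trans h2' (min_le_left _ _)⟩)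

set_option maxHeartbeats 4000000 in
theorem segKey_break {f_hi q : Int} (hq : q ≤ f_hi) (hlt : segEndV f_hi q < f_hi) :
    segKey (segEndV f_hi q + 1) ≠ segKey q := by
  unfold segEndV at *
  cases he : segEnd q with
  | none => simp only [he] at hlt; omega
  | some e =>
    simp only [he] at hlt ⊢
    have h1 := segEnd_some_ge he
    have h2 : min e f_hi = e := by omega
    rw [h2] at hlt ⊢
    unfold segEnd at he
    unfold segKey
    split_ifs at * <;> simp_all <;> omega

theorem segEndV_ge {f_hi q : Int} (hq : q ≤ f_hi) : q ≤ segEndV f_hi q := by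
  unfold segEndV
  cases he : segEnd q with
  | none => exact hq
  | some e => exact le_min (segEnd_some_ge he) hq

theorem segEndV_le (f_hi q : Int) (hq : q ≤ f_hi) : segEndV f_hi q ≤ f_hi := by
  unfold segEndV
  cases segEnd q with
  | none => exact le_refl _
  | some e => exact min_le_right _ _

-- absorbing a same-key prefix into buf
theorem iterA_loop_absorb (qs1 : List Int) (qs2 : List Int) (out : List (String × List Int))
    (cur_k : String) (buf : List Int) (h : ∀ q ∈ qs1, fukushu_segment_key q = cur_k) :
    iterA_loop (out, cur_k, buf) (qs1 ++ qs2) = iterA_loop (out, cur_k, buf ++ qs1) qs2 := by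
  induction qs1 generalizing buf with
  | nil => simp
  | cons q qs ih =>
    have hk : fukushu_segment_key q = cur_k := h q (by simp)
    simp only [List.cons_append, iterA_loop, hk, if_true]
    rw [ih _ (fun r hr => h r (by simp [hr]))]
    simp

-- the main invariant: A's loop from a state whose key is segKey start,
-- with the tail of the range still to consume, produces B's loop output
theorem main_inv (f_hi : Int) (start : Int) (hs : start ≤ f_hi)
    (out : List (String × List Int)) (buf : List Int) :
    finA (iterA_loop (out, segKey start, buf) (PySem.List.pyRange (start + 1) (f_hi + 1) 1))
      = out ++ (segKey start, buf ++ PySem.List.pyRange (start + 1) (segEndV f_hi start + 1) 1)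
          :: iterB_loop f_hi (segEndV f_hi start + 1) := by
  have hge : start ≤ segEndV f_hi start := segEndV_ge hs
  have hle : segEndV f_hi start ≤ f_hi := segEndV_le f_hi start hs
  have hsplit : PySem.List.pyRange (start + 1) (f_hi + 1) 1
      = PySem.List.pyRange (start + 1) (segEndV f_hi start + 1) 1
        ++ PySem.List.pyRange (segEndV f_hi start + 1) (f_hi + 1) 1 :=
    PySem.List.pyRange_one_append _ _ _ (by omega) (by omega)
  rw [hsplit, iterA_loop_absorb _ _ _ _ _ (by
    intro q hq
    rw [PySem.List.mem_pyRange_one] at hq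
    rw [key_eq]
    exact segKey_const' hs (by omega) (by omega))]
  by_cases hEf : segEndV f_hi start = f_hi
  · rw [hEf, PySem.List.pyRange_one_eq_nil (le_refl _)]
    rw [iterB_loop, dif_neg (by omega : ¬ (f_hi + 1 ≤ f_hi))]
    simp [iterA_loop, finA]
  · have hlt : segEndV f_hi start < f_hi := lt_of_le_of_ne hle hEf
    rw [PySem.List.pyRange_one_cons (a := segEndV f_hi start + 1) (b := f_hi + 1) (by omega)]
    have hne : fukushu_segment_key (segEndV f_hi start + 1) ≠ segKey start := by
      rw [key_eq]; exact segKey_break hs hlt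
    simp only [iterA_loop]
    rw [if_neg hne, key_eq, main_inv f_hi (segEndV f_hi start + 1) (by omega)]
    conv_rhs => rw [iterB_loop]
    rw [dif_pos (by omega : segEndV f_hi start + 1 ≤ f_hi)]
    have hcons : PySem.List.pyRange (segEndV f_hi start + 1) (segEndV f_hi (segEndV f_hi start + 1) + 1) 1
        = (segEndV f_hi start + 1)
          :: PySem.List.pyRange ((segEndV f_hi start + 1) + 1) (segEndV f_hi (segEndV f_hi start + 1) + 1) 1 :=
      PySem.List.pyRange_one_cons (by have := segEndV_ge (by omega : segEndV f_hi start + 1 ≤ f_hi); omega)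
    simp only [segEndV] at hcons ⊢
    simp [hcons]
termination_by (f_hi - start).toNat
decreasing_by
  have := segEndV_ge hs
  omega

-- ===== VERDICT (by name: the statement is the Claim_ definition above) =====
theorem iter_fukushu_segments_spec : Claim_equal_iter_fukushu_segments := by
  intro f_lo f_hi _
  unfold Spec_iter_fukushu_segments iter_fukushu_segments iter_fukushu_segments_alt
  by_cases h : f_lo ≤ f_hi
  · rw [PySem.List.pyRange_one_cons (by omega)]
    show finA (iterA_loop ([], fukushu_segment_key f_lo, [f_lo])
        (PySem.List.pyRange (f_lo + 1) (f_hi + 1) 1)) = iterB_loop f_hi f_lo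
    rw [key_eq, main_inv f_hi f_lo h [] [f_lo]]
    conv_rhs => rw [iterB_loop]
    rw [dif_pos h]
    have hcons : PySem.List.pyRange f_lo (segEndV f_hi f_lo + 1) 1
        = f_lo :: PySem.List.pyRange (f_lo + 1) (segEndV f_hi f_lo + 1) 1 :=
      PySem.List.pyRange_one_cons (by have := segEndV_ge h; omega)
    simp only [segEndV] at hcons ⊢
    simp [hcons]
  · rw [PySem.List.pyRange_one_eq_nil (by omega)]
    show ([] : List (String × List Int)) = iterB_loop f_hi f_lo
    rw [iterB_loop, dif_neg h]
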